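-- pv_equiv track=rewrite | github.com/MartinKnaze/AmazonScraper | SequentialScraper.py | define_sequences
-- ===== SOURCE A (Python) =====
-- def find_max_finished_layer(data):
--     max_finished_layer = len(max(data.keys(), key=len))
--     finished = True
--     if max_finished_layer != 0:
--         for i in range(max_finished_layer, 0, -1):
--             finished = True
--             for key in data:
--                 if len(key) == i:
--                     if data[key] == "":
--                         finished = False
--             if finished:
--                 max_finished_layer = i
--                 break
--         if not finished:
--             max_finished_layer = 0
--
--     return max_finished_layer
--
-- def define_sequences(data, used):
--     to_scrape = []
--
--     max_finished_layer = find_max_finished_layer(data)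
--
--     for key in data:
--         if key not in used:
--             if len(key) == (max_finished_layer + 1):
--                 if data[key] == "":
--                     to_scrape.append(key)
--                     used.append(key)
--
--     return to_scrape
-- ===== SOURCE B (Python) =====
-- def define_sequences(data, used):
--     # One pass builds a table: key-length -> "every value at this length is non-empty".
--     finished = {}
--     for k, v in data.items():
--         L = len(k)
--         finished[L] = finished.get(L, True) and v != ""
--     # Walk layers top-down; a layer with no keys counts as finished.
--     layer = 0
--     for i in range(len(max(data, key=len)), 0, -1):
--         if finished.get(i, True):
--             layer = i
--             break
--     to_scrape = [k for k, v in data.items()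
--                  if len(k) == layer + 1 and v == "" and k not in used]
--     used.extend(to_scrape)
--     return to_scrape
-- ===== Notes on version B (the rewrite author's own statement) =====
-- stated objective: faster
-- what changed: Replaces the per-layer rescans of the whole dict (an inner full scan for every candidate depth) by a single pass that groups key-lengths into a finished-table, then one table-lookup walk down the layers and one comprehension for the selection.
import Mathlib
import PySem

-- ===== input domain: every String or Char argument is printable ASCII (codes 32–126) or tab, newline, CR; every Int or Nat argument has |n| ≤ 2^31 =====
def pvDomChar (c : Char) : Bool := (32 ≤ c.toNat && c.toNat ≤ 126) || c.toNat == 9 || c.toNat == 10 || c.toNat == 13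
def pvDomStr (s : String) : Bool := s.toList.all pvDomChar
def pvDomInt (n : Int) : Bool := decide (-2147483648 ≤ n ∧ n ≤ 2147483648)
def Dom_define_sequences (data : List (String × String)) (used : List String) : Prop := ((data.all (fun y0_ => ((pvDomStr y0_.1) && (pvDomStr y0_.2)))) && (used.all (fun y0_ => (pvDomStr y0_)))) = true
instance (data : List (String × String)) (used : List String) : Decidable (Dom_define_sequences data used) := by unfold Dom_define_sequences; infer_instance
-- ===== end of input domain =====

-- B replaces A's repeated per-layer scans of the whole dict by a one-pass grouping table
-- plus one layer walk (faster); equivalence is about the RETURN value — both Pythons also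
-- append the same keys to `used` in the same order.


-- ===== PORT A =====
-- inner loop of find_max_finished_layer: 'finished' flag over all keys of length i
def dsLayerFinished (d : PySem.Dict String String) (i : Int) : Bool :=
  d.items.foldl (fun fin p =>
    if PySem.Str.len p.1 = i then (if d.getD p.1 "" = "" then false else fin) else fin) true

-- 'for i in range(max, 0, -1): … if finished: break' + trailing 'if not finished: 0'
def dsScan (d : PySem.Dict String String) : List Int → Int
  | [] => 0
  | i :: rest => if dsLayerFinished d i then i else dsScan d rest

def find_max_finished_layer (d : PySem.Dict String String) : Int :=
  let m := PySem.Str.len ((PySem.List.max? d.keys (fun s => PySem.Str.len s)).getD "")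
  if m = 0 then m else dsScan d (PySem.List.pyRange m 0 (-1))

def define_sequences (data : List (String × String)) (used : List String) : List String :=
  let d := PySem.Dict.ofList data
  let m := find_max_finished_layer d
  (d.items.foldl (fun (acc : List String × List String) p =>
      if p.1 ∈ acc.2 then acc
      else if PySem.Str.len p.1 = m + 1 then
        (if d.getD p.1 "" = "" then (acc.1 ++ [p.1], acc.2 ++ [p.1]) else acc)
      else acc) ([], used)).1

-- ===== PORT B =====
-- one-pass grouping table: key length ↦ "every value at this length is non-empty"
def dsTable (d : PySem.Dict String String) : PySem.Dict Int Bool :=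
  d.items.foldl (fun t p =>
    t.insert (PySem.Str.len p.1) (t.getD (PySem.Str.len p.1) true && (p.2 != ""))) PySem.Dict.empty

-- 'for i in range(m, 0, -1): if finished.get(i, True): layer = i; break' (layer starts 0)
def dsFirstFinished (tbl : PySem.Dict Int Bool) : List Int → Int
  | [] => 0
  | i :: rest => if tbl.getD i true then i else dsFirstFinished tbl rest

def define_sequences_alt (data : List (String × String)) (used : List String) : List String :=
  let d := PySem.Dict.ofList data
  let tbl := dsTable d
  let m := PySem.Str.len ((PySem.List.max? d.keys (fun s => PySem.Str.len s)).getD "")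
  let layer := dsFirstFinished tbl (PySem.List.pyRange m 0 (-1))
  (d.items.filter (fun p =>
      decide (PySem.Str.len p.1 = layer + 1) && (p.2 == "") && !(decide (p.1 ∈ used)))).map Prod.fst

-- ===== PRECONDITION & SPEC =====
-- Pre_ excludes only the empty dict, on which both Pythons raise ValueError in max().
def Pre_define_sequences (data : List (String × String)) (_used : List String) : Prop := data ≠ []
instance (data : List (String × String)) (used : List String) : Decidable (Pre_define_sequences data used) := by unfold Pre_define_sequences; infer_instance

def pvWitness_define_sequences : (List (String × String)) × List String := ([("a", ""), ("bc", "x")], ["z"])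

def Spec_define_sequences (data : List (String × String)) (used : List String) (out : List String) : Prop := out = define_sequences_alt data used
instance (data : List (String × String)) (used : List String) (out : List String) : Decidable (Spec_define_sequences data used out) := by unfold Spec_define_sequences; infer_instance

-- ===== CLAIM (what is proved, stated in full; the proofs are below) =====
def Claim_equal_define_sequences : Prop := ∀ (data : List (String × String)) (used : List String), Dom_define_sequences data used → Pre_define_sequences data used → Spec_define_sequences data used (define_sequences data used)

-- ===== LEMMAS AND PROOFS =====

-- B's table agrees with A's per-layer scan flag (no key of length i defaults to true).
theorem dsTable_getD_aux (items : List (String × String)) (t : PySem.Dict Int Bool) (i : Int) :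
    (items.foldl (fun t p =>
        t.insert (PySem.Str.len p.1) (t.getD (PySem.Str.len p.1) true && (p.2 != ""))) t).getD i true
      = items.foldl (fun fin p =>
          if PySem.Str.len p.1 = i then (if p.2 = "" then false else fin) else fin) (t.getD i true) := by
  induction items generalizing t with
  | nil => rfl
  | cons p rest ih =>
    simp only [List.foldl_cons]
    rw [ih, PySem.Dict.getD_insert]
    congr 1
    by_cases h : PySem.Str.len p.1 = i
    · subst h
      rw [if_pos rfl, if_pos rfl]
      by_cases hv : p.2 = "" <;> simp [hv]
    · rw [if_neg (fun hh => h hh.symm), if_neg h]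

theorem dsTable_getD (d : PySem.Dict String String) (i : Int) (hnd : d.keys.Nodup) :
    (dsTable d).getD i true = dsLayerFinished d i := by
  unfold dsTable dsLayerFinished
  rw [dsTable_getD_aux, PySem.Dict.getD_empty]
  exact (PySem.List.foldl_congr_mem _ _ _ _ (by
    intro acc p hp
    obtain ⟨k, v⟩ := p
    simp [PySem.Dict.getD_of_mem_items d hp hnd ""])).symm

theorem dsScan_eq (d : PySem.Dict String String) (l : List Int) (hnd : d.keys.Nodup) :
    dsScan d l = dsFirstFinished (dsTable d) l := by
  induction l with
  | nil => rfl
  | cons i rest ih => simp [dsScan, dsFirstFinished, dsTable_getD d i hnd, ih]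

-- the selection loop with its interleaved 'used' mutation, against the one-shot filter
theorem dsSelect_eq (d : PySem.Dict String String) (m : Int) (items : List (String × String))
    (ts us used : List String)
    (hlook : ∀ p ∈ items, d.getD p.1 "" = p.2)
    (hnodup : (items.map Prod.fst).Nodup)
    (hmem : ∀ p ∈ items, (p.1 ∈ us ↔ p.1 ∈ used)) :
    (items.foldl (fun (acc : List String × List String) p =>
      if p.1 ∈ acc.2 then acc
      else if PySem.Str.len p.1 = m + 1 then
        (if d.getD p.1 "" = "" then (acc.1 ++ [p.1], acc.2 ++ [p.1]) else acc)
      else acc) (ts, us)).1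
    = ts ++ (items.filter (fun p =>
        decide (PySem.Str.len p.1 = m + 1) && (p.2 == "") && !(decide (p.1 ∈ used)))).map Prod.fst := by
  induction items generalizing ts us with
  | nil => simp
  | cons p rest ih =>
    have hlookp := hlook p (by simp)
    obtain ⟨k, v⟩ := p
    simp only at hlookp ⊢
    have hmemp := hmem (k, v) (by simp)
    simp only at hmemp
    have hnodup' : (rest.map Prod.fst).Nodup := (List.nodup_cons.mp hnodup).2
    have hfresh : k ∉ rest.map Prod.fst := (List.nodup_cons.mp hnodup).1
    simp only [List.foldl_cons, List.filter_cons]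
    by_cases hu : k ∈ us
    · have hused : k ∈ used := hmemp.mp hu
      rw [if_pos hu]
      rw [ih ts us (fun q hq => hlook q (by simp [hq])) hnodup' (fun q hq => hmem q (by simp [hq]))]
      simp [hused]
    · have hused : k ∉ used := fun h => hu (hmemp.mpr h)
      rw [if_neg hu]
      by_cases hl : PySem.Str.len k = m + 1
      · have hl' : (k.length : Int) = m + 1 := by simpa using hl
        by_cases hv : d.getD k "" = ""
        · have hv2 : v = "" := by rw [← hlookp]; exact hv
          rw [if_pos hl, if_pos hv]
          rw [ih (ts ++ [k]) (us ++ [k])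
            (fun q hq => hlook q (by simp [hq])) hnodup'
            (fun q hq => by
              have hne : q.1 ≠ k := by
                intro h
                exact hfresh (h ▸ List.mem_map_of_mem hq)
              simp [List.mem_append, hne, hmem q (by simp [hq])])]
          simp [hl', hv2, hused]
        · have hv2 : v ≠ "" := by rw [← hlookp]; exact hv
          rw [if_pos hl, if_neg hv]
          rw [ih ts us (fun q hq => hlook q (by simp [hq])) hnodup' (fun q hq => hmem q (by simp [hq]))]
          simp [hv2]
      · have hl' : ¬((k.length : Int) = m + 1) := by simpa using hl
        rw [if_neg hl]
        rw [ih ts us (fun q hq => hlook q (by simp [hq])) hnodup' (fun q hq => hmem q (by simp [hq]))]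
        simp [hl']

theorem layer_eq (d : PySem.Dict String String) (hnd : d.keys.Nodup) :
    find_max_finished_layer d
      = dsFirstFinished (dsTable d)
          (PySem.List.pyRange (PySem.Str.len ((PySem.List.max? d.keys (fun s => PySem.Str.len s)).getD "")) 0 (-1)) := by
  unfold find_max_finished_layer
  by_cases hm : PySem.Str.len ((PySem.List.max? d.keys (fun s => PySem.Str.len s)).getD "") = 0
  · simp only [hm]
    rw [PySem.List.pyRange_neg_one_eq_nil (by norm_num)]
    rfl
  · simp only [if_neg hm]
    exact dsScan_eq d _ hnd

-- the two ports, with the shared dict named and the lets expanded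
theorem both_eq (d : PySem.Dict String String) (used : List String)
    (hnd : d.keys.Nodup) :
    (d.items.foldl (fun (acc : List String × List String) p =>
      if p.1 ∈ acc.2 then acc
      else if PySem.Str.len p.1 = find_max_finished_layer d + 1 then
        (if d.getD p.1 "" = "" then (acc.1 ++ [p.1], acc.2 ++ [p.1]) else acc)
      else acc) ([], used)).1
    = (d.items.filter (fun p =>
        decide (PySem.Str.len p.1 = dsFirstFinished (dsTable d)
          (PySem.List.pyRange (PySem.Str.len ((PySem.List.max? d.keys (fun s => PySem.Str.len s)).getD "")) 0 (-1)) + 1)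
        && (p.2 == "") && !(decide (p.1 ∈ used)))).map Prod.fst := by
  rw [← layer_eq d hnd]
  exact dsSelect_eq d (find_max_finished_layer d) d.items [] used used
    (fun p hp => by
      obtain ⟨k, v⟩ := p
      exact PySem.Dict.getD_of_mem_items _ hp hnd "")
    (by simpa [PySem.Dict.keys] using hnd)
    (fun _ _ => Iff.rfl)

-- ===== VERDICT (by name: the statement is the Claim_ definition above) =====
theorem define_sequences_spec : Claim_equal_define_sequences := by
  intro data used _ _
  exact both_eq (PySem.Dict.ofList data) used (PySem.Dict.nodup_keys_ofList _)
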